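-- pv_equiv track=rewrite | github.com/CristianCamiloForero/Hackaton | backend/consolidador.py | optimizar_picking
-- ===== SOURCE A (Python) =====
-- def optimizar_picking(items_ubicaciones):
--     """
--     Versión mejorada: recibe items y retorna ruta optimizada
--     usando agrupación por zonas.
--
--     Args:
--         items_ubicaciones: list de [fila, col, cantidad, sku]
--
--     Returns:
--         list ordenada optimizada
--     """
--     if not items_ubicaciones:
--         return []
--
--     # Agrupar por zona (columna como proxy)
--     zonas = {}
--     for item in items_ubicaciones:
--         fila, col = item[0], item[1]
--         zona = col // 3  # Dividir en 3 zonas (ajustable)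
--
--         if zona not in zonas:
--             zonas[zona] = []
--         zonas[zona].append(item)
--
--     # Ordenar cada zona
--     resultado = []
--     for zona_id in sorted(zonas.keys()):
--         zona_items = zonas[zona_id]
--         zona_items.sort(key=lambda x: x[0])  # Ordenar por fila
--         resultado.extend(zona_items)
--
--     return resultado
-- ===== SOURCE B (Python) =====
-- def optimizar_picking(items_ubicaciones):
--     """Two-pass stable sort: by fila first, then by zone (col // 3).
--
--     Stability of Python's sort makes this equal to grouping by zone and
--     sorting each zone by fila."""
--     por_fila = sorted(items_ubicaciones, key=lambda item: item[0])
--     return sorted(por_fila, key=lambda item: item[1] // 3)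
-- ===== Notes on version B (the rewrite author's own statement) =====
-- stated objective: simpler
-- what changed: Replaced A's two-phase pipeline (group items into a zone dict, sort the zone keys, sort each bucket by fila, concatenate) with two chained stable sorts: sort by fila, then stably sort by zone col//3; no dict or bucket concatenation at all.
import Mathlib
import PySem

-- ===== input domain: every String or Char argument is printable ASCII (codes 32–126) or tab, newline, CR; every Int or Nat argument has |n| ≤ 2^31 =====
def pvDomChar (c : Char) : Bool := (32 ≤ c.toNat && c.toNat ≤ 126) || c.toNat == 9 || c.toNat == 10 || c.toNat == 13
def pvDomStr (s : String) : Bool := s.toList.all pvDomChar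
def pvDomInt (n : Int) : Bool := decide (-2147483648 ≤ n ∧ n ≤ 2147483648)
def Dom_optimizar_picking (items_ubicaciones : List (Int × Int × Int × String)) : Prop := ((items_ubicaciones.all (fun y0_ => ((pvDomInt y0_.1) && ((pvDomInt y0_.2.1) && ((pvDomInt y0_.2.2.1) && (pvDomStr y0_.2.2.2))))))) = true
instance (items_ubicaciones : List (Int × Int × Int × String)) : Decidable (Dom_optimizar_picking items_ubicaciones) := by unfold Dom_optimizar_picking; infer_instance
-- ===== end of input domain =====

-- B replaces A's group-by-zone dict + per-zone sort with two chained stable sorts (simpler decomposition, same results).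

-- ===== PORT A =====
def optimizar_picking (items_ubicaciones : List (Int × Int × Int × String)) : List (Int × Int × Int × String) :=
  if items_ubicaciones = [] then []
  else
    -- zonas = {}; for item in items: zona = col // 3; if zona not in zonas: zonas[zona] = []; zonas[zona].append(item)
    let zonas : PySem.Dict Int (List (Int × Int × Int × String)) :=
      items_ubicaciones.foldl (fun d item =>
        let zona : Int := PySem.Int.floordiv item.2.1 3
        let d' := if d.contains zona then d else d.insert zona []
        d'.modify zona [] (fun l => l ++ [item])) PySem.Dict.empty
    -- resultado = []; for zona_id in sorted(zonas.keys()): zona_items = zonas[zona_id]; zona_items.sort(key=λx. x[0]); resultado.extend(zona_items)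
    let resultado : List (Int × Int × Int × String) :=
      (PySem.List.sorted zonas.keys (fun k => k) false).foldl (fun acc zona_id =>
        let zona_items := PySem.List.sorted (zonas.getD zona_id []) (fun x => x.1) false
        acc ++ zona_items) []
    resultado

-- ===== PORT B =====
def optimizar_picking_alt (items_ubicaciones : List (Int × Int × Int × String)) : List (Int × Int × Int × String) :=
  -- por_fila = sorted(items, key=λitem. item[0]); return sorted(por_fila, key=λitem. item[1] // 3)
  let por_fila := PySem.List.sorted items_ubicaciones (fun item => item.1) false
  PySem.List.sorted por_fila (fun item => PySem.Int.floordiv item.2.1 3) false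

-- ===== PRECONDITION & SPEC =====
def Spec_optimizar_picking (items_ubicaciones : List (Int × Int × Int × String)) (out : List (Int × Int × Int × String)) : Prop := out = optimizar_picking_alt items_ubicaciones
instance (items_ubicaciones : List (Int × Int × Int × String)) (out : List (Int × Int × Int × String)) : Decidable (Spec_optimizar_picking items_ubicaciones out) := by unfold Spec_optimizar_picking; infer_instance

-- ===== CLAIM (what is proved, stated in full; the proofs are below) =====
def Claim_equal_optimizar_picking : Prop := ∀ (items_ubicaciones : List (Int × Int × Int × String)), Dom_optimizar_picking items_ubicaciones → Spec_optimizar_picking items_ubicaciones (optimizar_picking items_ubicaciones)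

-- ===== LEMMAS AND PROOFS =====

-- Stability step: inserting x into a key-sorted list appends it to the back of its key class.
theorem pv_filter_insertBy {α : Type} (key : α → Int) (x : α) (v : Int) (l : List α)
    (h : l.Pairwise (fun a b => key a ≤ key b)) :
    (PySem.List.insertBy (fun a b => decide (key a < key b)) x l).filter (fun y => key y == v)
      = l.filter (fun y => key y == v) ++ (if key x == v then [x] else []) := by
  induction l with
  | nil => simp [PySem.List.insertBy]; split_ifs <;> simp_all
  | cons y ys ih =>
    rw [List.pairwise_cons] at h
    obtain ⟨hy, hys⟩ := h
    by_cases hlt : key x < key y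
    · simp only [PySem.List.insertBy, hlt, decide_true, if_true]
      by_cases hv : key x = v
      · have hyv : ¬ (key y = v) := by omega
        have hnil : ys.filter (fun z => key z == v) = [] := by
          apply List.filter_eq_nil_iff.2
          intro z hz
          have := hy z hz
          simp only [beq_iff_eq]
          intro hzv; omega
        simp [hv, hyv, hnil]
      · have : (key x == v) = false := by simp [hv]
        simp [this]
    · simp only [PySem.List.insertBy, hlt, decide_false, Bool.false_eq_true, if_false]
      rw [List.filter_cons, List.filter_cons, ih hys]
      split <;> simp

-- Stability law: stable sorting does not reorder the elements of one key class.
theorem pv_filter_sorted {α : Type} (key : α → Int) (xs : List α) (v : Int) :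
    (PySem.List.sorted xs key false).filter (fun y => key y == v)
      = xs.filter (fun y => key y == v) := by
  induction xs using List.reverseRecOn with
  | nil => rfl
  | append_singleton xs x ih =>
    have hs : PySem.List.sorted (xs ++ [x]) key false
        = PySem.List.insertBy (fun a b => decide (key a < key b)) x (PySem.List.sorted xs key false) := by
      rw [PySem.List.sorted_eq_foldl_insertBy, PySem.List.sorted_eq_foldl_insertBy, List.foldl_append]
      rfl
    rw [hs, pv_filter_insertBy key x v _ (PySem.List.sorted_pairwise xs key), ih, List.filter_append,
      List.filter_cons]
    split <;> simp

-- Uniqueness: a key-sorted list is determined by its key-class filters.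
theorem pv_eq_of_filters {α : Type} (key : α → Int) :
    ∀ (l₁ l₂ : List α), l₁.Pairwise (fun a b => key a ≤ key b) → l₂.Pairwise (fun a b => key a ≤ key b) →
    (∀ v : Int, l₁.filter (fun y => key y == v) = l₂.filter (fun y => key y == v)) → l₁ = l₂ := by
  intro l₁
  induction l₁ with
  | nil =>
    intro l₂ _ _ hf
    cases l₂ with
    | nil => rfl
    | cons y t =>
      exfalso
      have := hf (key y)
      simp at this
  | cons x t₁ ih =>
    intro l₂ h₁ h₂ hf
    cases l₂ with
    | nil =>
      exfalso
      have := hf (key x)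
      simp at this
    | cons y t₂ =>
      rw [List.pairwise_cons] at h₁ h₂
      have hxm : x ∈ y :: t₂ := by
        have h := hf (key x)
        have hx : x ∈ (y :: t₂).filter (fun z => key z == key x) := by
          rw [← h]; simp
        exact (List.mem_filter.1 hx).1
      have hym : y ∈ x :: t₁ := by
        have h := hf (key y)
        have hy : y ∈ (x :: t₁).filter (fun z => key z == key y) := by
          rw [h]; simp
        exact (List.mem_filter.1 hy).1
      have hxy : key x = key y := by
        have b1 : key x ≤ key y := by
          rcases List.mem_cons.1 hym with h | h
          · rw [h]
          · exact h₁.1 y h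
        have b2 : key y ≤ key x := by
          rcases List.mem_cons.1 hxm with h | h
          · rw [h]
          · exact h₂.1 x h
        omega
      have h1 := hf (key x)
      rw [List.filter_cons, List.filter_cons] at h1
      have e1 : (key x == key x) = true := by simp
      have e2 : (key y == key x) = true := by simp [hxy]
      rw [e1, e2] at h1
      simp only [if_true] at h1
      have hxeq : x = y := (List.cons.injEq _ _ _ _ ▸ h1).1
      have htails : t₁ = t₂ := by
        apply ih t₂ h₁.2 h₂.2
        intro v
        by_cases hv : key x = v
        · subst hv
          exact (List.cons.injEq _ _ _ _ ▸ h1).2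
        · have hb : (key x == v) = false := by simp [hv]
          have hbv : (key y == v) = false := by simp [← hxy, hv]
          have h := hf v
          rw [List.filter_cons, List.filter_cons, hb, hbv] at h
          simpa using h
      rw [hxeq, htails]

-- Filtering commutes with stable sorting.
theorem pv_sorted_filter {α : Type} (key : α → Int) (p : α → Bool) (xs : List α) :
    (PySem.List.sorted xs key false).filter p = PySem.List.sorted (xs.filter p) key false := by
  have hcomm : ∀ (l : List α) (v : Int),
      (l.filter p).filter (fun y => key y == v) = (l.filter (fun y => key y == v)).filter p := by
    intro l v
    simp [List.filter_filter, Bool.and_comm]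
  apply pv_eq_of_filters key
  · exact (PySem.List.sorted_pairwise xs key).filter p
  · exact PySem.List.sorted_pairwise _ key
  · intro v
    rw [hcomm, pv_filter_sorted, pv_filter_sorted, ← hcomm]

-- A concatenation of key classes in key order is key-sorted.
theorem pv_pairwise_flatMap {α : Type} (key : α → Int) (S : List Int) (g : Int → List α)
    (hS : S.Pairwise (· < ·))
    (hg : ∀ v ∈ S, ∀ x ∈ g v, key x = v) :
    (S.flatMap g).Pairwise (fun a b => key a ≤ key b) := by
  induction S with
  | nil => simp
  | cons w S' ih =>
    rw [List.pairwise_cons] at hS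
    rw [List.flatMap_cons, List.pairwise_append]
    refine ⟨?_, ih hS.2 (fun v hv x hx => hg v (List.mem_cons_of_mem _ hv) x hx), ?_⟩
    · have : ∀ x ∈ g w, key x = w := hg w (List.mem_cons_self) 
      -- elements of one class are pairwise tied
      have hconst : (g w).Pairwise (fun a b => key a ≤ key b) := by
        apply List.Pairwise.imp_of_mem (fun {a b} ha hb _ => by rw [this a ha, this b hb]) 
        exact List.pairwise_of_forall (fun _ _ => trivial)
      exact hconst
    · intro a ha b hb
      rw [hg w (List.mem_cons_self) a ha]
      obtain ⟨v, hv, hbv⟩ := List.mem_flatMap.1 hb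
      rw [hg v (List.mem_cons_of_mem _ hv) b hbv]
      exact le_of_lt (hS.1 v hv)

-- The key-class filter of such a concatenation picks out exactly its own block.
theorem pv_filter_flatMap {α : Type} (key : α → Int) (S : List Int) (g : Int → List α) (v : Int)
    (hnd : S.Nodup)
    (hg : ∀ w ∈ S, ∀ x ∈ g w, key x = w) :
    (S.flatMap g).filter (fun x => key x == v) = if v ∈ S then g v else [] := by
  induction S with
  | nil => simp
  | cons w S' ih =>
    rw [List.nodup_cons] at hnd
    rw [List.flatMap_cons, List.filter_append,
      ih hnd.2 (fun u hu x hx => hg u (List.mem_cons_of_mem _ hu) x hx)]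
    by_cases hwv : w = v
    · subst hwv
      have hfull : (g w).filter (fun x => key x == w) = g w :=
        List.filter_eq_self.2 (fun x hx => by simp [hg w List.mem_cons_self x hx])
      have hnot : (w ∈ S') = False := by simp [hnd.1]
      simp [hfull, hnd.1]
    · have hnone : (g w).filter (fun x => key x == v) = [] :=
        List.filter_eq_nil_iff.2 (fun x hx => by simp [hg w List.mem_cons_self x hx]; omega)
      have : (v ∈ w :: S') ↔ (v ∈ S') := by
        constructor
        · intro h; rcases List.mem_cons.1 h with h | h
          · exact absurd h.symm hwv
          · exact h
        · exact List.mem_cons_of_mem _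
      simp only [hnone, List.nil_append]
      by_cases hv : v ∈ S' <;> simp [hv, this]

-- zone key
def pvZona (x : Int × Int × Int × String) : Int := PySem.Int.floordiv x.2.1 3

-- A's grouping loop, reduced to the pure modify loop.
theorem pv_step_eq :
    (fun (d : PySem.Dict Int (List (Int × Int × Int × String))) (item : Int × Int × Int × String) =>
      let zona : Int := PySem.Int.floordiv item.2.1 3
      let d' := if d.contains zona then d else d.insert zona []
      d'.modify zona [] (fun l => l ++ [item]))
    = (fun d item => d.modify (pvZona item) [] (fun l => l ++ [item])) := by
  funext d item
  have key : ∀ (z : Int),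
      ((if d.contains z then d else d.insert z []).modify z []
        (fun l => l ++ [item])) = d.modify z [] (fun l => l ++ [item]) := by
    intro z
    by_cases hc : d.contains z
    · rw [if_pos hc]
    · rw [if_neg hc]
      have hc' : d.contains z = false := by simpa using hc
      simp [PySem.Dict.modify, PySem.Dict.getD_insert_self, PySem.Dict.insert_insert_self,
        PySem.Dict.getD_of_not_contains _ _ hc']
  exact key _

theorem pv_dict_keys (xs : List (Int × Int × Int × String)) :
    (xs.foldl (fun d item => d.modify (pvZona item) [] (fun l => l ++ [item])) PySem.Dict.empty).keys
      = PySem.Set.ofList (xs.map pvZona) := by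
  have h := PySem.Dict.keys_foldl_modify_key xs pvZona ([] : List (Int × Int × Int × String))
    (fun _ x => fun l => l ++ [x]) PySem.Dict.empty
  simpa [PySem.Dict.keys_empty, PySem.Set.update_empty] using h

theorem pv_dict_getD (xs : List (Int × Int × Int × String)) (v : Int) :
    (xs.foldl (fun d item => d.modify (pvZona item) [] (fun l => l ++ [item])) PySem.Dict.empty).getD v []
      = xs.filter (fun x => pvZona x == v) := by
  have h := PySem.Dict.getD_foldl_modify_append (xs.map (fun x => (pvZona x, x))) PySem.Dict.empty v
  rw [List.foldl_map] at h
  rw [h]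
  simp [List.filter_map, Function.comp_def, List.map_map]

-- A as a flatMap of per-zone fila-sorted blocks.
theorem pv_A_eq (xs : List (Int × Int × Int × String)) :
    optimizar_picking xs
      = (PySem.List.sorted (PySem.Set.ofList (xs.map pvZona)) (fun k => k) false).flatMap
          (fun v => PySem.List.sorted (xs.filter (fun x => pvZona x == v)) (fun x => x.1) false) := by
  by_cases hnil : xs = []
  · subst hnil; rfl
  · unfold optimizar_picking
    rw [if_neg hnil]
    simp only [pv_step_eq, pv_dict_keys, pv_dict_getD, PySem.List.foldl_append_eq_flatMap,
      List.nil_append]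

theorem optimizar_picking_spec : Claim_equal_optimizar_picking := by
  intro xs _
  unfold Spec_optimizar_picking optimizar_picking_alt
  rw [pv_A_eq]
  show _ = PySem.List.sorted (PySem.List.sorted xs (fun item => item.1) false) pvZona false
  have hS : (PySem.List.sorted (PySem.Set.ofList (xs.map pvZona)) (fun k => k) false).Pairwise (· < ·) :=
    PySem.List.sorted_ofList_pairwise_lt _
  have hSnd : (PySem.List.sorted (PySem.Set.ofList (xs.map pvZona)) (fun k => k) false).Nodup :=
    (PySem.List.sorted_perm _ _ _).nodup_iff.2 (PySem.Set.nodup_ofList _)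
  have hg : ∀ v ∈ PySem.List.sorted (PySem.Set.ofList (xs.map pvZona)) (fun k => k) false,
      ∀ x ∈ PySem.List.sorted (xs.filter (fun x => pvZona x == v)) (fun x => x.1) false, pvZona x = v := by
    intro v _ x hx
    have hm := (PySem.List.mem_sorted _ _ _ _).1 hx
    have hf := (List.mem_filter.1 hm).2
    simpa using hf
  apply pv_eq_of_filters pvZona
  · exact pv_pairwise_flatMap pvZona _ _ hS hg
  · exact PySem.List.sorted_pairwise _ pvZona
  · intro v
    rw [pv_filter_flatMap pvZona _ _ v hSnd hg, pv_filter_sorted pvZona _ v,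
      pv_sorted_filter (fun x => x.1) (fun x => pvZona x == v) xs]
    by_cases hv : v ∈ PySem.List.sorted (PySem.Set.ofList (xs.map pvZona)) (fun k => k) false
    · rw [if_pos hv]
    · rw [if_neg hv]
      have hfe : xs.filter (fun x => pvZona x == v) = [] := by
        apply List.filter_eq_nil_iff.2
        intro x hx hxz
        apply hv
        rw [PySem.List.mem_sorted, PySem.Set.mem_ofList]
        exact List.mem_map.2 ⟨x, hx, by simpa using hxz⟩
      rw [hfe]
      rfl
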